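-- pv_equiv track=rewrite | github.com/lustre-tools/lustre-test-vms-v2 | ltvm_pkg/cli/clean.py | _short_prefix
-- ===== SOURCE A (Python) =====
-- def _short_prefix(full_dirname: str, declared_shorts: list[str]) -> str:
--     """Map a kernel directory name to its declared short prefix.
--
--     Mirrors TargetConfig._short_kernel_name: prefer the longest declared
--     short that matches the directory name (either exactly or as a
--     ``<short>-`` prefix).  Falls back to the dirname itself when no
--     declared short matches -- those entries are off-list.
--     """
--     matches = [
--         s for s in declared_shorts
--         if full_dirname == s or full_dirname.startswith(s + "-")
--     ]
--     if not matches: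
--         return full_dirname
--     return max(matches, key=len)
-- ===== SOURCE B (Python) =====
-- def _short_prefix(full_dirname: str, declared_shorts: list[str]) -> str:
--     shorts = set(declared_shorts)
--     if full_dirname in shorts:
--         return full_dirname
--     for i in range(len(full_dirname) - 1, -1, -1):
--         if full_dirname[i] == '-':
--             cand = full_dirname[:i]
--             if cand in shorts:
--                 return cand
--     return full_dirname
-- ===== Notes on version B (the rewrite author's own statement) =====
-- stated objective: idiomatic
-- what changed: Instead of filtering declared_shorts with a startswith test per element and taking the max by length, B builds a set of the declared shorts once and scans the dirname's '-'-boundary prefixes right to left (longest first), returning the first one found in the set.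
import Mathlib
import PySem

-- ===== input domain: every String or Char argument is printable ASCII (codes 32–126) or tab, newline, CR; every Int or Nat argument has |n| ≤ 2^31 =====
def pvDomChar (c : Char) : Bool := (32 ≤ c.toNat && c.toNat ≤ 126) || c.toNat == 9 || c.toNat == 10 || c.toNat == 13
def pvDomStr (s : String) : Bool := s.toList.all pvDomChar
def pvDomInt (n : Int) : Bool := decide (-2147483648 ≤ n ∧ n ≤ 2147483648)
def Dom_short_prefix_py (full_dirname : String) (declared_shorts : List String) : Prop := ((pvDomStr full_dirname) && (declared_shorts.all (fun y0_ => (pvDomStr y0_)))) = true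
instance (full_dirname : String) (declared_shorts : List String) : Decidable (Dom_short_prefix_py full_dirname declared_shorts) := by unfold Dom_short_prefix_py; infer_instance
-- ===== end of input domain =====

-- B replaces A's scan of declared_shorts (startswith test on every declared short) by one
-- right-to-left scan of the dirname's '-'-boundary prefixes with set lookups (objective: idiomatic).

-- ===== PORT A =====
-- 'len' as max key ported as the Nat list length (order-isomorphic to Python's int len, exact)
def short_prefix_py (full_dirname : String) (declared_shorts : List String) : String :=
  let ms := declared_shorts.filter
    (fun s => full_dirname == s || PySem.Chars.startswith full_dirname.toList (s.toList ++ ['-']))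
  if ms.isEmpty then full_dirname
  else (PySem.List.max? ms (fun s => s.toList.length)).getD full_dirname

-- ===== PORT B =====
-- the 'for i in range(len(full_dirname)-1, -1, -1)' loop with its early returns, as a structural
-- recursion counting i+1 down; i is always in range, the slice full_dirname[:i] is List.take i
def pvAltScan (full : List Char) (shorts : PySem.Set String) : Nat → String
  | 0 => String.ofList full
  | i + 1 =>
    if full.getD i ' ' = '-' then
      if PySem.Set.contains shorts (String.ofList (full.take i)) then String.ofList (full.take i)
      else pvAltScan full shorts i
    else pvAltScan full shorts i

def short_prefix_py_alt (full_dirname : String) (declared_shorts : List String) : String :=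
  let shorts := PySem.Set.ofList declared_shorts
  if PySem.Set.contains shorts full_dirname then full_dirname
  else pvAltScan full_dirname.toList shorts full_dirname.toList.length

-- ===== PRECONDITION & SPEC =====
def Spec_short_prefix_py (full_dirname : String) (declared_shorts : List String) (out : String) : Prop := out = short_prefix_py_alt full_dirname declared_shorts
instance (full_dirname : String) (declared_shorts : List String) (out : String) : Decidable (Spec_short_prefix_py full_dirname declared_shorts out) := by unfold Spec_short_prefix_py; infer_instance

-- ===== CLAIM (what is proved, stated in full; the proofs are below) =====
def Claim_equal_short_prefix_py : Prop := ∀ (full_dirname : String) (declared_shorts : List String), Dom_short_prefix_py full_dirname declared_shorts → Spec_short_prefix_py full_dirname declared_shorts (short_prefix_py full_dirname declared_shorts)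

-- ===== LEMMAS AND PROOFS =====

-- A's filter predicate, named for the proofs (defeq to the lambda in the port)
def pvP (full : String) : String → Bool :=
  fun s => full == s || PySem.Chars.startswith full.toList (s.toList ++ ['-'])


theorem pvGetD_eq_getElem {l : List Char} {j : Nat} (h : j < l.length) : l.getD j ' ' = l[j] := by
  simp [List.getD_eq_getElem?_getD, List.getElem?_eq_getElem h]

-- characterization of A's match predicate: a match is the take of the dirname at its own
-- length, either the whole dirname or cut at a '-' boundary
theorem pvMatch_iff (full s : String) :
    pvP full s = true ↔
      (s = full ∨ (s.toList.length < full.toList.length ∧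
        s.toList = full.toList.take s.toList.length ∧
        full.toList.getD s.toList.length ' ' = '-')) := by
  rw [pvP, Bool.or_eq_true, beq_iff_eq, PySem.Chars.startswith_iff, List.prefix_iff_eq_take]
  constructor
  · rintro (h | h)
    · exact Or.inl h.symm
    · right
      have hlen := congrArg List.length h
      rw [List.length_take, List.length_append, List.length_singleton] at hlen
      have hlt : s.toList.length < full.toList.length := by omega
      rw [show (s.toList ++ ['-']).length = s.toList.length + 1 by
            rw [List.length_append, List.length_singleton],
          List.take_add_one, List.getElem?_eq_getElem hlt, Option.toList_some] at h
      have hinj := List.append_inj' h (by rfl)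
      refine ⟨hlt, hinj.1, ?_⟩
      rw [pvGetD_eq_getElem hlt]
      exact (List.singleton_inj.mp hinj.2).symm
  · rintro (h | ⟨hlt, htake, hdash⟩)
    · exact Or.inl h.symm
    · right
      rw [pvGetD_eq_getElem hlt] at hdash
      rw [show (s.toList ++ ['-']).length = s.toList.length + 1 by
            rw [List.length_append, List.length_singleton],
          List.take_add_one, List.getElem?_eq_getElem hlt, Option.toList_some, hdash, ← htake]

-- the loop condition of B at index j
def pvC (full : List Char) (declared : List String) (j : Nat) : Prop :=
  full.getD j ' ' = '-' ∧ String.ofList (full.take j) ∈ declared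

theorem pvContains_iff (declared : List String) (x : String) :
    PySem.Set.contains (PySem.Set.ofList declared) x = true ↔ x ∈ declared := by
  rw [show PySem.Set.contains (PySem.Set.ofList declared) x
        = (decide (x ∈ PySem.Set.ofList declared)) by simp [PySem.Set.contains]]
  simp [PySem.Set.mem_ofList]

-- invariant of B's scan: either no boundary hit below i (fallback), or the largest one below i
theorem pvAltScan_spec (full : List Char) (declared : List String) :
    ∀ i : Nat,
      (pvAltScan full (PySem.Set.ofList declared) i = String.ofList full ∧
        ∀ j, j < i → ¬ pvC full declared j) ∨
      (∃ j, j < i ∧ pvC full declared j ∧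
        pvAltScan full (PySem.Set.ofList declared) i = String.ofList (full.take j) ∧
        ∀ j', j < j' → j' < i → ¬ pvC full declared j') := by
  intro i
  induction i with
  | zero => exact Or.inl ⟨rfl, by omega⟩
  | succ i ih =>
    by_cases hd : full.getD i ' ' = '-'
    · by_cases hc : PySem.Set.contains (PySem.Set.ofList declared) (String.ofList (full.take i)) = true
      · refine Or.inr ⟨i, by omega, ⟨hd, (pvContains_iff _ _).mp hc⟩, ?_, by omega⟩
        simp only [pvAltScan]
        rw [if_pos hd, if_pos hc]
      · have hni : ¬ pvC full declared i := fun h => hc ((pvContains_iff _ _).mpr h.2)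
        have hstep : pvAltScan full (PySem.Set.ofList declared) (i + 1) =
            pvAltScan full (PySem.Set.ofList declared) i := by
          simp only [pvAltScan]
          rw [if_pos hd, if_neg hc]
        rcases ih with ⟨heq, hno⟩ | ⟨j, hj, hcj, heq, hmax⟩
        · refine Or.inl ⟨hstep.trans heq, ?_⟩
          intro j hj
          rcases Nat.lt_succ_iff_lt_or_eq.mp hj with h | h
          · exact hno j h
          · exact h ▸ hni
        · refine Or.inr ⟨j, by omega, hcj, hstep.trans heq, ?_⟩
          intro j' h1 h2
          rcases Nat.lt_succ_iff_lt_or_eq.mp h2 with h | h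
          · exact hmax j' h1 h
          · exact h ▸ hni
    · have hni : ¬ pvC full declared i := fun h => hd h.1
      have hstep : pvAltScan full (PySem.Set.ofList declared) (i + 1) =
          pvAltScan full (PySem.Set.ofList declared) i := by
        simp only [pvAltScan]
        rw [if_neg hd]
      rcases ih with ⟨heq, hno⟩ | ⟨j, hj, hcj, heq, hmax⟩
      · refine Or.inl ⟨hstep.trans heq, ?_⟩
        intro j hj
        rcases Nat.lt_succ_iff_lt_or_eq.mp hj with h | h
        · exact hno j h
        · exact h ▸ hni
      · refine Or.inr ⟨j, by omega, hcj, hstep.trans heq, ?_⟩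
        intro j' h1 h2
        rcases Nat.lt_succ_iff_lt_or_eq.mp h2 with h | h
        · exact hmax j' h1 h
        · exact h ▸ hni

theorem pvMax_some {ms : List String} (h : ms ≠ []) :
    ∃ m, PySem.List.max? ms (fun s => s.toList.length) = some m := by
  cases hm : PySem.List.max? ms (fun s => s.toList.length) with
  | none => exact absurd ((PySem.List.max?_eq_none_iff _ _).mp hm) h
  | some m => exact ⟨m, rfl⟩

theorem pv_main (full : String) (declared : List String) :
    short_prefix_py full declared = short_prefix_py_alt full declared := by
  have hA : short_prefix_py full declared =
      (if (declared.filter (pvP full)).isEmpty then full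
       else (PySem.List.max? (declared.filter (pvP full)) (fun s => s.toList.length)).getD full) := rfl
  have hB : short_prefix_py_alt full declared =
      (if PySem.Set.contains (PySem.Set.ofList declared) full then full
       else pvAltScan full.toList (PySem.Set.ofList declared) full.toList.length) := rfl
  rw [hA, hB]
  by_cases hfull : PySem.Set.contains (PySem.Set.ofList declared) full = true
  · rw [if_pos hfull]
    have hmemfull : full ∈ declared := (pvContains_iff declared full).mp hfull
    have hpfull : pvP full full = true := by simp [pvP]
    have hmf : full ∈ declared.filter (pvP full) := List.mem_filter.mpr ⟨hmemfull, hpfull⟩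
    have hne : declared.filter (pvP full) ≠ [] := List.ne_nil_of_mem hmf
    rw [if_neg (by simpa [List.isEmpty_iff] using hne)]
    obtain ⟨m, hm⟩ := pvMax_some hne
    rw [hm, Option.getD_some]
    have hle : full.toList.length ≤ m.toList.length := PySem.List.max?_isMax hm full hmf
    have hpm : pvP full m = true := (List.mem_filter.mp (PySem.List.max?_mem hm)).2
    rcases (pvMatch_iff full m).mp hpm with h | ⟨hlt, _, _⟩
    · exact h
    · exact absurd hle (by omega)
  · rw [if_neg hfull]
    have hnmem : full ∉ declared := fun h => hfull ((pvContains_iff declared full).mpr h)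
    rcases pvAltScan_spec full.toList declared full.toList.length with ⟨heq, hno⟩ | ⟨j, hj, hcj, heq, hmax⟩
    · have hnil : declared.filter (pvP full) = [] := by
        rw [List.filter_eq_nil_iff]
        intro s hs hp
        rcases (pvMatch_iff full s).mp hp with h | ⟨hlt, htake, hdash⟩
        · exact hnmem (h ▸ hs)
        · exact hno s.toList.length hlt ⟨hdash, by rw [← htake]; simpa using hs⟩
      rw [heq, hnil]
      simp
    · have hlenc : (String.ofList (full.toList.take j)).toList.length = j := by
        simp only [String.toList_ofList, List.length_take]
        omega
      have hpc : pvP full (String.ofList (full.toList.take j)) = true := by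
        apply (pvMatch_iff full _).mpr
        right
        rw [hlenc]
        exact ⟨hj, by simp, hcj.1⟩
      have hmf : String.ofList (full.toList.take j) ∈ declared.filter (pvP full) :=
        List.mem_filter.mpr ⟨hcj.2, hpc⟩
      have hne : declared.filter (pvP full) ≠ [] := List.ne_nil_of_mem hmf
      rw [heq, if_neg (by simpa [List.isEmpty_iff] using hne)]
      obtain ⟨m, hm⟩ := pvMax_some hne
      rw [hm, Option.getD_some]
      have hge : j ≤ m.toList.length := by
        have h := PySem.List.max?_isMax hm _ hmf
        rwa [hlenc] at h
      have hpm : pvP full m = true := (List.mem_filter.mp (PySem.List.max?_mem hm)).2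
      have hmdecl : m ∈ declared := (List.mem_filter.mp (PySem.List.max?_mem hm)).1
      rcases (pvMatch_iff full m).mp hpm with h | ⟨hlt, htake, hdash⟩
      · exact absurd (h ▸ hmdecl) hnmem
      · have hCm : pvC full.toList declared m.toList.length :=
          ⟨hdash, by rw [← htake]; simpa using hmdecl⟩
        have hle : m.toList.length ≤ j := by
          by_contra hgt
          exact hmax m.toList.length (by omega) hlt hCm
        have hmt : m.toList = full.toList.take j := by
          rw [htake, le_antisymm hle hge]
        calc m = String.ofList m.toList := by simp
          _ = String.ofList (full.toList.take j) := by rw [hmt]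

-- ===== VERDICT (by name: the statement is the Claim_ definition above) =====
theorem short_prefix_py_spec : Claim_equal_short_prefix_py := by
  intro full_dirname declared_shorts _
  unfold Spec_short_prefix_py
  exact pv_main full_dirname declared_shorts
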